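-- pv_equiv track=rewrite | github.com/NRaudseps/bnp-pin-code | main.py | sort_sequence
-- ===== SOURCE A (Python) =====
-- def sort_sequence(number_sequence):
--     row_y_axis = [420, 500]
--     rows = []
--     for y_axis in row_y_axis:
--         # Separate by Y axis
--         row = {k: v for k, v in number_sequence.items() if v[1] == y_axis}
--         # Sort by X axis
--         row = sorted(row.items(), key=lambda x_axis: x_axis[1][0])
--         # Turn dict to array
--         row = [v[0] for v in row]
--         rows += row
--     return rows
-- ===== SOURCE B (Python) =====
-- def sort_sequence(number_sequence):
--     # One pass: filter to the two known rows, then a single stable sort by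
--     # the composite key (row priority, x); row 420 ranks before row 500.
--     items = [(k, v) for k, v in number_sequence.items() if v[1] in (420, 500)]
--     items.sort(key=lambda kv: (0 if kv[1][1] == 420 else 1, kv[1][0]))
--     return [kv[0] for kv in items]
-- ===== Notes on version B (the rewrite author's own statement) =====
-- stated objective: simpler
-- what changed: Replaces the per-row loop of two dict-comprehension filters plus two sorts with a single filter and one stable sort on the composite key (row priority, x).
import Mathlib
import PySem

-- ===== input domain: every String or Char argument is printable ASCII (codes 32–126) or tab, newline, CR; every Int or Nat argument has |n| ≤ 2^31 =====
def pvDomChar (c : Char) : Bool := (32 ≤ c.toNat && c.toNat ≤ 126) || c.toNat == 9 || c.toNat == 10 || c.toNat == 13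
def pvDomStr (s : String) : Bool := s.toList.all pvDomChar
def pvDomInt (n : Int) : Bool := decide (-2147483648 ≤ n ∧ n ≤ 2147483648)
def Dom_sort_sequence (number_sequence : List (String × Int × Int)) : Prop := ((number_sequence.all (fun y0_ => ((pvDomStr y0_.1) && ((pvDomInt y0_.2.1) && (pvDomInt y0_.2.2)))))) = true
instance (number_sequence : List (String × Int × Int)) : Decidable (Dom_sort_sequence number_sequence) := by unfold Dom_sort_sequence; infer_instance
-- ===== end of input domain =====

-- B collapses A's two filter+sort row passes into ONE stable sort on the composite
-- key (row priority, x); same return value, different decomposition.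

-- ===== PORT A =====
-- for y_axis in [420, 500]: filter by v[1] == y_axis, sort the row by x, append the keys
def sort_sequence (number_sequence : List (String × Int × Int)) : List String :=
  let row_y_axis : List Int := [420, 500]
  row_y_axis.foldl (fun rows y_axis =>
    let row := number_sequence.filter (fun kv => kv.2.2 == y_axis)
    let row := PySem.List.sorted row (fun x_axis => x_axis.2.1) false
    rows ++ row.map (fun v => v.1)) []

-- ===== PORT B =====
-- one filter to the two known rows, one stable sort by (row priority, x), keys
def sort_sequence_alt (number_sequence : List (String × Int × Int)) : List String :=
  let items := number_sequence.filter (fun kv => kv.2.2 == 420 || kv.2.2 == 500)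
  let items := PySem.List.sorted2 items
    (fun kv => if kv.2.2 == 420 then (0 : Int) else 1) (fun kv => kv.2.1) false
  items.map (fun kv => kv.1)

-- ===== PRECONDITION & SPEC =====
def Spec_sort_sequence (number_sequence : List (String × Int × Int)) (out : List String) : Prop := out = sort_sequence_alt number_sequence
instance (number_sequence : List (String × Int × Int)) (out : List String) : Decidable (Spec_sort_sequence number_sequence out) := by unfold Spec_sort_sequence; infer_instance

-- ===== CLAIM (what is proved, stated in full; the proofs are below) =====
def Claim_equal_sort_sequence : Prop := ∀ (number_sequence : List (String × Int × Int)), Dom_sort_sequence number_sequence → Spec_sort_sequence number_sequence (sort_sequence number_sequence)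

-- ===== LEMMAS AND PROOFS =====

-- pointwise congruence of insertBy in its inserted element's comparisons
theorem insertBy_congr_mem {α : Type} (b b' : α → α → Bool) (e : α) (L : List α)
    (h : ∀ y ∈ L, b e y = b' e y) :
    PySem.List.insertBy b e L = PySem.List.insertBy b' e L := by
  induction L with
  | nil => rfl
  | cons y ys ih =>
    simp [PySem.List.insertBy, h y (by simp)]
    rcases hb : b' e y with _ | _
    · simp [ih (fun z hz => h z (by simp [hz]))]
    · simp

-- inserting an element that compares-before everything on the right stays in the left part
theorem insertBy_append_true {α : Type} (b b' : α → α → Bool) (e : α) (L0 L1 : List α)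
    (h0 : ∀ y ∈ L0, b e y = b' e y) (h1 : ∀ y ∈ L1, b e y = true) :
    PySem.List.insertBy b e (L0 ++ L1) = PySem.List.insertBy b' e L0 ++ L1 := by
  induction L0 with
  | nil =>
    cases L1 with
    | nil => rfl
    | cons z zs => simp [PySem.List.insertBy, h1 z (by simp)]
  | cons y ys ih =>
    have hy := h0 y (by simp)
    rcases hb : b' e y with _ | _
    · simp [PySem.List.insertBy, hy, hb,
        ih (fun z hz => h0 z (by simp [hz]))]
    · simp [PySem.List.insertBy, hy, hb]

-- inserting an element that compares-before nothing on the left goes to the right part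
theorem insertBy_append_false {α : Type} (b b' : α → α → Bool) (e : α) (L0 L1 : List α)
    (h0 : ∀ y ∈ L0, b e y = false) (h1 : ∀ y ∈ L1, b e y = b' e y) :
    PySem.List.insertBy b e (L0 ++ L1) = L0 ++ PySem.List.insertBy b' e L1 := by
  induction L0 with
  | nil => simpa using insertBy_congr_mem b b' e L1 h1
  | cons y ys ih =>
    simp [PySem.List.insertBy, h0 y (by simp),
      ih (fun z hz => h0 z (by simp [hz]))]

-- the two-valued-rank split of a stable composite-key sort
theorem sorted2_split {α : Type} (r x : α → Int) (hr : ∀ a, r a = 0 ∨ r a = 1)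
    (xs : List α) :
    PySem.List.sorted2 xs r x false =
      PySem.List.sorted (xs.filter (fun a => r a == 0)) x false ++
      PySem.List.sorted (xs.filter (fun a => r a == 1)) x false := by
  induction xs using List.reverseRecOn with
  | nil => rfl
  | append_singleton ys e ih =>
    have hfold2 : ∀ (zs : List α), PySem.List.sorted2 zs r x false =
        zs.foldl (fun acc a => PySem.List.insertBy
          (fun a b => decide (r a < r b) || (!decide (r b < r a) && decide (x a < x b))) a acc) [] := by
      intro zs; rfl
    have hfold : ∀ (zs : List α), PySem.List.sorted zs x false =
        zs.foldl (fun acc a => PySem.List.insertBy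
          (fun a b => decide (x a < x b)) a acc) [] :=
      fun zs => PySem.List.sorted_eq_foldl_insertBy zs x
    have mem0 : ∀ y ∈ PySem.List.sorted (ys.filter (fun a => r a == 0)) x false, r y = 0 := by
      intro y hy
      have := (PySem.List.sorted_perm (ys.filter (fun a => r a == 0)) x false).mem_iff.mp hy
      simpa using (List.of_mem_filter this)
    have mem1 : ∀ y ∈ PySem.List.sorted (ys.filter (fun a => r a == 1)) x false, r y = 1 := by
      intro y hy
      have := (PySem.List.sorted_perm (ys.filter (fun a => r a == 1)) x false).mem_iff.mp hy
      simpa using (List.of_mem_filter this)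
    rw [hfold2, List.foldl_append, List.foldl_cons, List.foldl_nil, ← hfold2, ih]
    rcases hr e with he | he
    · have hf0 : List.filter (fun a => r a == 0) (ys ++ [e])
          = List.filter (fun a => r a == 0) ys ++ [e] := by
        simp [List.filter_append, he]
      have hf1 : List.filter (fun a => r a == 1) (ys ++ [e])
          = List.filter (fun a => r a == 1) ys := by
        simp [List.filter_append, he]
      rw [insertBy_append_true
        (fun a b => decide (r a < r b) || (!decide (r b < r a) && decide (x a < x b)))
        (fun a b => decide (x a < x b)) e _ _
        (fun y hy => by simp [he, mem0 y hy])
        (fun y hy => by simp [he, mem1 y hy]),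
        hf0, hf1, hfold (List.filter (fun a => r a == 0) ys ++ [e]),
        List.foldl_append, List.foldl_cons, List.foldl_nil, ← hfold]
    · have hf0 : List.filter (fun a => r a == 0) (ys ++ [e])
          = List.filter (fun a => r a == 0) ys := by
        simp [List.filter_append, he]
      have hf1 : List.filter (fun a => r a == 1) (ys ++ [e])
          = List.filter (fun a => r a == 1) ys ++ [e] := by
        simp [List.filter_append, he]
      rw [insertBy_append_false
        (fun a b => decide (r a < r b) || (!decide (r b < r a) && decide (x a < x b)))
        (fun a b => decide (x a < x b)) e _ _
        (fun y hy => by simp [he, mem0 y hy])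
        (fun y hy => by simp [he, mem1 y hy]),
        hf0, hf1, hfold (List.filter (fun a => r a == 1) ys ++ [e]),
        List.foldl_append, List.foldl_cons, List.foldl_nil, ← hfold]

-- ===== VERDICT (by name: the statement is the Claim_ definition above) =====
theorem sort_sequence_spec : Claim_equal_sort_sequence := by
  intro ns _
  show sort_sequence ns = sort_sequence_alt ns
  simp only [sort_sequence, sort_sequence_alt]
  rw [sorted2_split (α := String × Int × Int) (fun kv => if kv.2.2 == 420 then (0 : Int) else 1) (fun kv => kv.2.1)
    (fun a => by by_cases h : a.2.2 == 420 <;> simp [h])]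
  simp only [List.foldl_cons, List.foldl_nil, List.nil_append, List.map_append,
    List.filter_filter]
  congr 2
  all_goals
    congr 1
    apply List.filter_congr
    intro a _
    by_cases h : a.2.2 = 420 <;> by_cases h5 : a.2.2 = 500 <;> simp_all
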